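-- pv_equiv track=rewrite | github.com/BACKAI/PA-Attack_TextVQA | pa_code/prepare_textvqa_server.py | select_records_by_image
-- ===== SOURCE A (Python) =====
-- from collections import Counter, OrderedDict
--
-- def group_by_image(records):
--     grouped = OrderedDict()
--     for record in records:
--         image_id = str(record.get("image_id", "")).strip()
--         question = str(record.get("question", "")).strip()
--         if not image_id or not question:
--             continue
--         grouped.setdefault(image_id, []).append(record)
--     return grouped
--
-- def select_records_by_image(records, image_limit):
--     grouped = group_by_image(records)
--     selected_image_ids = list(grouped.keys())
--     if image_limit is not None:
--         selected_image_ids = selected_image_ids[:image_limit]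
--     selected_records = []
--     for image_id in selected_image_ids:
--         selected_records.extend(grouped[image_id])
--     return selected_image_ids, selected_records
-- ===== SOURCE B (Python) =====
-- def select_records_by_image(records, image_limit):
--     def field(record, key):
--         return str(record.get(key, "")).strip()
--
--     valid = [r for r in records if field(r, "image_id") and field(r, "question")]
--     groups = []
--     rest = valid
--     while rest:
--         k = field(rest[0], "image_id")
--         groups.append((k, [r for r in rest if field(r, "image_id") == k]))
--         rest = [r for r in rest if field(r, "image_id") != k]
--     if image_limit is not None:
--         groups = groups[:image_limit]
--     selected_image_ids = [k for k, _ in groups]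
--     selected_records = []
--     for _, g in groups:
--         selected_records.extend(g)
--     return selected_image_ids, selected_records
-- ===== Notes on version B (the rewrite author's own statement) =====
-- stated objective: alternative
-- what changed: B replaces A's single-pass OrderedDict-of-lists grouping by a repeated-partition (gather) pass: it filters the valid records once, then repeatedly peels off all records sharing the first remaining image_id into (id, group) pairs, slices that pair list by image_limit and concatenates the kept groups.
import Mathlib
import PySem

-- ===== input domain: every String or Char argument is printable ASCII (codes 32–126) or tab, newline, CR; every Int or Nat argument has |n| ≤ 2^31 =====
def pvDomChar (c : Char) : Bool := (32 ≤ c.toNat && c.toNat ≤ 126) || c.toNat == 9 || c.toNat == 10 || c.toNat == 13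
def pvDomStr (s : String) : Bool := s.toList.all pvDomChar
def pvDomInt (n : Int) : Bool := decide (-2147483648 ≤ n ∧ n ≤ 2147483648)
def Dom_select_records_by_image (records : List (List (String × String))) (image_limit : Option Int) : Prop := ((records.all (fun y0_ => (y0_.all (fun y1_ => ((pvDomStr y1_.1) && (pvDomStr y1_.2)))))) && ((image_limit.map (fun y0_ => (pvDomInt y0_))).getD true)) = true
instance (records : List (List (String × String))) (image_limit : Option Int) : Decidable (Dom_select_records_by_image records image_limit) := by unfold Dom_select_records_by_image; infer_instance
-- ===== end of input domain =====

-- B groups by repeatedly peeling all records of the first remaining image_id off the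
-- valid-record list (partition/gather) instead of A's OrderedDict-of-lists single pass;
-- alternative decomposition, same results.

-- shared field access: str(record.get(k, "")).strip()  (str on a str value is the identity)
def pvField (record : List (String × String)) (k : String) : String :=
  PySem.Str.strip ((PySem.Dict.mk record).getD k "")

-- ===== PORT A =====
def pvGroupByImage (records : List (List (String × String))) :
    PySem.Dict String (List (List (String × String))) :=
  records.foldl (fun grouped record =>
    let image_id := pvField record "image_id"
    let question := pvField record "question"
    if image_id = "" ∨ question = "" then grouped
    else grouped.modify image_id [] (· ++ [record]))  -- setdefault(k, []).append(r)
    PySem.Dict.empty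

def select_records_by_image (records : List (List (String × String))) (image_limit : Option Int) : List String × (List (List (String × String))) :=
  let grouped := pvGroupByImage records
  let selected_image_ids :=
    match image_limit with
    | none => grouped.keys
    | some l => PySem.List.slice grouped.keys none (some l)
  -- grouped[image_id]: image_id is always a key of grouped here, so getD is exact
  let selected_records := selected_image_ids.foldl
    (fun acc image_id => acc ++ grouped.getD image_id []) []
  (selected_image_ids, selected_records)

-- ===== PORT B =====
-- the while loop of Source B: peel all records with the first remaining image_id into a
-- (id, group) pair, recurse on the rest (the removed part is nonempty, so rest shrinks)
def pvGather (rest : List (List (String × String))) :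
    List (String × List (List (String × String))) :=
  match rest with
  | [] => []
  | r :: tl =>
    let k := pvField r "image_id"
    (k, (r :: tl).filter (fun x => pvField x "image_id" == k)) ::
      pvGather (tl.filter (fun x => pvField x "image_id" != k))
  termination_by rest.length
  decreasing_by
    simpa using Nat.lt_succ_of_le (le_trans (List.length_filter_le _ _) (by simp))

def select_records_by_image_alt (records : List (List (String × String))) (image_limit : Option Int) : List String × (List (List (String × String))) :=
  let valid := records.filter (fun r => pvField r "image_id" != "" && pvField r "question" != "")
  let groups0 := pvGather valid
  let groups :=
    match image_limit with
    | none => groups0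
    | some l => PySem.List.slice groups0 none (some l)
  (groups.map Prod.fst, groups.foldl (fun acc p => acc ++ p.2) [])

-- ===== PRECONDITION & SPEC =====
def Spec_select_records_by_image (records : List (List (String × String))) (image_limit : Option Int) (out : List String × (List (List (String × String)))) : Prop := out = select_records_by_image_alt records image_limit
instance (records : List (List (String × String))) (image_limit : Option Int) (out : List String × (List (List (String × String)))) : Decidable (Spec_select_records_by_image records image_limit out) := by unfold Spec_select_records_by_image; infer_instance

-- ===== CLAIM (what is proved, stated in full; the proofs are below) =====
def Claim_equal_select_records_by_image : Prop := ∀ (records : List (List (String × String))) (image_limit : Option Int), Dom_select_records_by_image records image_limit → Spec_select_records_by_image records image_limit (select_records_by_image records image_limit)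

-- ===== LEMMAS AND PROOFS =====

-- validity predicate of both programs (proof-only abbreviation)
def pvValid (r : List (String × String)) : Bool :=
  pvField r "image_id" != "" && pvField r "question" != ""

-- A's grouping fold is the grouping fold over the valid (image_id, record) pairs
theorem pvGroup_eq_pairs (records : List (List (String × String)))
    (g : PySem.Dict String (List (List (String × String)))) :
    records.foldl (fun grouped record =>
      let image_id := pvField record "image_id"
      let question := pvField record "question"
      if image_id = "" ∨ question = "" then grouped
      else grouped.modify image_id [] (· ++ [record])) g
    = ((records.filter pvValid).map (fun r => (pvField r "image_id", r))).foldl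
        (fun d p => d.modify p.1 [] (· ++ [p.2])) g := by
  induction records generalizing g with
  | nil => rfl
  | cons r rs ih =>
    simp only [List.foldl_cons, List.filter_cons, pvValid]
    by_cases h1 : pvField r "image_id" = ""
    · simp [h1, ih]
    · by_cases h2 : pvField r "question" = ""
      · simp [h1, h2, ih]
      · rw [if_neg (show ¬(pvField r "image_id" = "" ∨ pvField r "question" = "") by
            simp [h1, h2])]
        rw [if_pos (show (pvField r "image_id" != "" && pvField r "question" != "") = true by
            simp [h1, h2])]
        rw [List.map_cons, List.foldl_cons]
        exact ih _

-- updating a set with elements it already absorbs: occurrences of a member may be dropped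
theorem pvUpdate_filter_mem {x : String} (s : PySem.Set String) (xs : List String)
    (hx : x ∈ s) :
    PySem.Set.update s xs = PySem.Set.update s (xs.filter (fun y => y != x)) := by
  induction xs generalizing s with
  | nil => rfl
  | cons y t ih =>
    by_cases hxy : y = x
    · subst hxy
      simp only [List.filter_cons, bne_self_eq_false, Bool.false_eq_true, if_false,
        PySem.Set.update, List.foldl_cons]
      rw [PySem.Set.add_of_mem hx]
      exact ih s hx
    · rw [show List.filter (fun y => y != x) (y :: t) = y :: List.filter (fun y => y != x) t
          from by simp [hxy]]
      simp only [PySem.Set.update, List.foldl_cons]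
      exact ih _ ((PySem.Set.mem_add _ _ _).2 (Or.inl hx))

-- prepending a fresh element to the set commutes with updating by a list avoiding it
theorem pvUpdate_cons_not_mem {x : String} (s : PySem.Set String) (xs : List String)
    (hx : x ∉ xs) :
    PySem.Set.update (x :: s) xs = x :: PySem.Set.update s xs := by
  induction xs generalizing s with
  | nil => rfl
  | cons y t ih =>
    have hyx : y ≠ x := fun h => hx (h ▸ List.mem_cons_self)
    have hadd : PySem.Set.add (x :: s) y = x :: PySem.Set.add s y := by
      simp only [PySem.Set.add, PySem.Set.contains, List.contains_cons]
      rw [show (y == x) = false by simp [hyx]]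
      by_cases hm : y ∈ s <;> simp [hm]
    simp only [PySem.Set.update, List.foldl_cons]
    rw [hadd]
    exact ih _ (fun h => hx (List.mem_cons_of_mem _ h))

-- gather's first components are the ordered distinct image ids
theorem pvGather_fst (l : List (List (String × String))) :
    (pvGather l).map Prod.fst = PySem.Set.ofList (l.map (fun r => pvField r "image_id")) := by
  induction l using pvGather.induct with
  | case1 => rw [pvGather]; rfl
  | case2 r tl k ih =>
    simp only [List.unattach_filter, List.unattach_attach] at ih
    rw [pvGather]
    simp only [List.map_cons]
    rw [ih]
    have h1 : PySem.Set.ofList (pvField r "image_id" :: tl.map (fun r => pvField r "image_id"))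
        = PySem.Set.update [pvField r "image_id"] (tl.map (fun r => pvField r "image_id")) := rfl
    rw [h1, pvUpdate_filter_mem _ _ (List.mem_singleton.2 rfl)]
    have h2 : (tl.map (fun r => pvField r "image_id")).filter
          (fun y => y != pvField r "image_id")
        = (tl.filter (fun x => pvField x "image_id" != pvField r "image_id")).map
            (fun r => pvField r "image_id") := by
      rw [List.filter_map]; rfl
    rw [h2, pvUpdate_cons_not_mem]
    · rfl
    · intro hmem
      rcases List.mem_map.1 hmem with ⟨x, hx, hxe⟩
      have := List.of_mem_filter hx
      simp only [bne_iff_ne, ne_eq] at this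
      exact this hxe

-- gather ids are ids of members of the input list
theorem pvGather_fst_mem (l : List (List (String × String))) (k : String)
    (hk : k ∈ (pvGather l).map Prod.fst) :
    ∃ r ∈ l, pvField r "image_id" = k := by
  rw [pvGather_fst] at hk
  have := (PySem.Set.mem_ofList _ _).1 hk
  rcases List.mem_map.1 this with ⟨x, hx, hxe⟩
  exact ⟨x, hx, hxe⟩

-- every pair produced by gather carries the full bucket of its id
theorem pvGather_snd (l : List (List (String × String)))
    (p : String × List (List (String × String))) (hp : p ∈ pvGather l) :
    p.2 = l.filter (fun x => pvField x "image_id" == p.1) := by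
  induction l using pvGather.induct with
  | case1 => simp [pvGather] at hp
  | case2 r tl k ih =>
    simp only [List.unattach_filter, List.unattach_attach] at ih
    rw [pvGather] at hp
    rcases List.mem_cons.1 hp with h | h
    · subst h; rfl
    · have hne : p.1 ≠ pvField r "image_id" := by
        rcases pvGather_fst_mem _ _ (List.mem_map.2 ⟨p, h, rfl⟩) with ⟨x, hx, hxe⟩
        have := List.of_mem_filter hx
        simp only [bne_iff_ne, ne_eq] at this
        exact hxe ▸ this
      rw [ih h]
      rw [List.filter_filter]
      rw [List.filter_cons_of_neg (by simp [Ne.symm hne])]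
      refine (List.filter_congr ?_).symm
      intro x _
      by_cases hx : pvField x "image_id" == p.1
      · have : pvField x "image_id" ≠ pvField r "image_id" := by
          have := eq_of_beq hx; rw [this]; exact hne
        simp only [hx, Bool.true_and]
        exact (by simp [this] : (pvField x "image_id" != pvField r "image_id") = true).symm
      · simp [hx]


-- the group of a nonempty id inside the dict is B's record filter
-- the valid (id, record) pairs of a given nonempty id project back to the record filter
theorem pvPairs_filter_eq (records : List (List (String × String))) (iid : String)
    (hne : iid ≠ "") :
    ((((records.filter pvValid).map (fun r => (pvField r "image_id", r))).filter
        (fun p => p.1 == iid)).map (fun p => p.2))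
      = records.filter (fun record =>
          pvField record "image_id" == iid && pvField record "question" != "") := by
  induction records with
  | nil => rfl
  | cons r rs ih =>
    simp only [List.filter_cons, pvValid]
    by_cases h1 : pvField r "image_id" = ""
    · simp [h1, Ne.symm hne, bne, ih]
    · by_cases h2 : pvField r "question" = ""
      · simp [h2, bne, ih]
      · by_cases h3 : pvField r "image_id" = iid
        · simp [h2, h3, hne, bne, ih]
        · simp [h1, h2, h3, bne, ih]

theorem pvGetD_eq_filter (records : List (List (String × String))) (iid : String)
    (hne : iid ≠ "") :
    (pvGroupByImage records).getD iid []
      = records.filter (fun record =>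
          pvField record "image_id" == iid && pvField record "question" != "") := by
  unfold pvGroupByImage
  rw [pvGroup_eq_pairs, PySem.Dict.getD_foldl_modify_append]
  rw [PySem.Dict.getD_empty, List.nil_append]
  exact pvPairs_filter_eq records iid hne

-- A's dict keys are the distinct ids of the valid records
theorem pvKeys_eq (records : List (List (String × String))) :
    (pvGroupByImage records).keys
      = PySem.Set.ofList ((records.filter pvValid).map (fun r => pvField r "image_id")) := by
  unfold pvGroupByImage
  rw [pvGroup_eq_pairs,
    PySem.Dict.keys_foldl_modify_key
      (key := fun p : String × List (String × String) => p.1)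
      (f := fun d p => (fun x => x ++ [p.2])) (d0 := []) (d := PySem.Dict.empty)]
  simp only [PySem.Dict.keys_empty, List.map_map, Function.comp_def]
  rfl

-- slicing commutes with map (slice reads only the length through the bounds)
theorem pvSlice_map {α β : Type} (f : α → β) (xs : List α) (b : Int) :
    PySem.List.slice (xs.map f) none (some b) = (PySem.List.slice xs none (some b)).map f := by
  by_cases hb : 0 ≤ b
  · rw [PySem.List.slice_to _ hb, PySem.List.slice_to _ hb, List.map_take]
  · have hk : 0 < (-b).toNat := by omega
    have hbe : b = -(((-b).toNat : Nat) : Int) := by omega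
    rw [hbe, PySem.List.slice_to_neg_natCast _ _ hk, PySem.List.slice_to_neg_natCast _ _ hk,
      List.map_take, List.length_map]

-- A's concatenation loop over any list of nonempty ids is the flatMap of the filters
theorem pvConcat_eq (records : List (List (String × String))) (ids : List String)
    (hmem : ∀ iid ∈ ids, iid ≠ "") (acc : List (List (String × String))) :
    ids.foldl (fun acc image_id => acc ++ (pvGroupByImage records).getD image_id []) acc
      = acc ++ ids.flatMap (fun image_id => records.filter (fun record =>
          pvField record "image_id" == image_id && pvField record "question" != "")) := by
  induction ids generalizing acc with
  | nil => simp
  | cons iid rest ih =>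
    rw [List.foldl_cons, List.flatMap_cons,
      pvGetD_eq_filter records iid (hmem iid List.mem_cons_self),
      ih (fun j hj => hmem j (List.mem_cons_of_mem _ hj)), List.append_assoc]

-- ids drawn from the distinct valid image ids are nonempty
theorem pvMem_ids_ne (records : List (List (String × String))) (iid : String)
    (h : iid ∈ PySem.Set.ofList
      ((records.filter pvValid).map (fun r => pvField r "image_id"))) : iid ≠ "" := by
  rcases List.mem_map.1 ((PySem.Set.mem_ofList _ _).1 h) with ⟨x, hx, hxe⟩
  have := List.of_mem_filter hx
  simp only [pvValid, Bool.and_eq_true, bne_iff_ne, ne_eq] at this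
  exact hxe ▸ this.1

-- the bucket of a nonempty id inside the valid records is the record filter
theorem pvBucket_eq (records : List (List (String × String))) (iid : String)
    (hne : iid ≠ "") :
    (records.filter pvValid).filter (fun x => pvField x "image_id" == iid)
      = records.filter (fun record =>
          pvField record "image_id" == iid && pvField record "question" != "") := by
  rw [List.filter_filter]
  refine List.filter_congr ?_
  intro x _
  by_cases hx : pvField x "image_id" == iid
  · have h1 : pvField x "image_id" ≠ "" := by rw [eq_of_beq hx]; exact hne
    simp [pvValid, hx, h1]
  · simp [hx]

-- B's concatenation loop over pairs whose group is determined by the id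
theorem pvFoldl_pairs_eq {F : String → List (List (String × String))}
    (gs : List (String × List (List (String × String))))
    (h : ∀ p ∈ gs, p.2 = F p.1) (acc : List (List (String × String))) :
    gs.foldl (fun acc p => acc ++ p.2) acc = acc ++ (gs.map Prod.fst).flatMap F := by
  induction gs generalizing acc with
  | nil => simp
  | cons p rest ih =>
    rw [List.foldl_cons, List.map_cons, List.flatMap_cons,
      h p List.mem_cons_self, ih (fun q hq => h q (List.mem_cons_of_mem _ hq)),
      List.append_assoc]

-- ===== VERDICT (by name: the statement is the Claim_ definition above) =====
theorem select_records_by_image_spec : Claim_equal_select_records_by_image := by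
  intro records image_limit _
  unfold Spec_select_records_by_image select_records_by_image select_records_by_image_alt
  have hval : records.filter
        (fun r => pvField r "image_id" != "" && pvField r "question" != "")
      = records.filter pvValid := rfl
  rw [hval]
  cases image_limit with
  | none =>
    dsimp only
    have hids : (pvGroupByImage records).keys = (pvGather (records.filter pvValid)).map Prod.fst := by
      rw [pvKeys_eq, pvGather_fst]
    rw [hids]
    refine Prod.ext rfl ?_
    rw [pvConcat_eq records _ (fun iid h => pvMem_ids_ne records iid (by
        rw [← pvGather_fst]; exact h)), List.nil_append]
    rw [pvFoldl_pairs_eq (F := fun image_id => records.filter (fun record =>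
        pvField record "image_id" == image_id && pvField record "question" != "")) _ ?_ []]
    · rw [List.nil_append]
    · intro p hp
      have h1 := pvGather_snd _ p hp
      have h2 : p.1 ≠ "" := pvMem_ids_ne records p.1 (by
        rw [← pvGather_fst]; exact List.mem_map.2 ⟨p, hp, rfl⟩)
      rw [h1, pvBucket_eq records p.1 h2]
  | some l =>
    dsimp only
    have hids : PySem.List.slice (pvGroupByImage records).keys none (some l)
        = (PySem.List.slice (pvGather (records.filter pvValid)) none (some l)).map Prod.fst := by
      rw [pvKeys_eq, ← pvGather_fst, pvSlice_map]
    rw [hids]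
    refine Prod.ext rfl ?_
    have hmem : ∀ p, p ∈ PySem.List.slice (pvGather (records.filter pvValid)) none (some l) →
        p ∈ pvGather (records.filter pvValid) :=
      fun p hp => PySem.List.mem_of_mem_slice _ none (some l) hp
    rw [pvConcat_eq records _ (fun iid h => pvMem_ids_ne records iid (by
        rw [← pvGather_fst]
        rcases List.mem_map.1 h with ⟨p, hp, rfl⟩
        exact List.mem_map.2 ⟨p, hmem p hp, rfl⟩)), List.nil_append]
    rw [pvFoldl_pairs_eq (F := fun image_id => records.filter (fun record =>
        pvField record "image_id" == image_id && pvField record "question" != "")) _ ?_ []]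
    · rw [List.nil_append]
    · intro p hp
      have h1 := pvGather_snd _ p (hmem p hp)
      have h2 : p.1 ≠ "" := pvMem_ids_ne records p.1 (by
        rw [← pvGather_fst]; exact List.mem_map.2 ⟨p, hmem p hp, rfl⟩)
      rw [h1, pvBucket_eq records p.1 h2]
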